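-- pv_equiv track=rewrite | github.com/NudelMaster/meal_planner | src/prepare_for_retrieval.py | lemmatize_recipe_tokens
-- ===== SOURCE A (Python) =====
-- from typing import List, Dict
--
-- PLURAL_MAP = {
--     "cloves": "clove",
--     "leaves": "leaf",
--     "sprigs": "sprig",
--     "pods": "pod",
--     "eggs": "egg",
--     "tomatoes": "tomato",
--     "shallots": "shallot",
--     "cherries": "cherry",
--     "berries": "berry",
-- }
--
-- PROTECT_S = {"couscous","hummus","asparagus"}
--
-- PARTICIPLE_MAP = {
--     "diced":"dice","chopped":"chop","minced":"mince","grated":"grate","sliced":"slice",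
--     "crushed":"crush","peeled":"peel","zested":"zest","juiced":"juice","roasted":"roast",
--     "toasted":"toast","bruised":"bruise","halved":"halve","mashed":"mash","rinsed":"rinse",
--     "washed":"wash","thinly":"thinly","roughly":"roughly","shredded":"shred"
-- }
--
-- def lemmatize_recipe_tokens(tokens: List[str]) -> List[str]:
--     out = []
--     for w in tokens:
--         ww = w
--         if ww in PROTECT_S:
--             out.append(ww); continue
--         if ww in PLURAL_MAP:
--             ww = PLURAL_MAP[ww]
--         if ww in PARTICIPLE_MAP:
--             ww = PARTICIPLE_MAP[ww]
--         out.append(ww)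
--     return out
-- ===== SOURCE B (Python) =====
-- from typing import List
--
-- # All lemma pairs in one flat whitespace-separated string (plural entries first,
-- # then participle entries); protected words like "couscous" are simply absent,
-- # and no plural output is a participle key, so one lookup suffices.
-- LEMMA_DATA = """
-- cloves clove  leaves leaf  sprigs sprig  pods pod  eggs egg
-- tomatoes tomato  shallots shallot  cherries cherry  berries berry
-- diced dice  chopped chop  minced mince  grated grate  sliced slice
-- crushed crush  peeled peel  zested zest  juiced juice  roasted roast
-- toasted toast  bruised bruise  halved halve  mashed mash  rinsed rinse
-- washed wash  thinly thinly  roughly roughly  shredded shred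
-- """
--
-- _it = iter(LEMMA_DATA.split())
-- LEMMA_TABLE = dict(zip(_it, _it))
--
-- def lemmatize_recipe_tokens(tokens: List[str]) -> List[str]:
--     return [LEMMA_TABLE.get(w, w) for w in tokens]
-- ===== Notes on version B (the rewrite author's own statement) =====
-- stated objective: alternative
-- what changed: B stores all lemma pairs as one flat whitespace-separated data string, parses it once into a single merged table (pairing consecutive tokens), and maps each word through one table.get(w, w) lookup, replacing A's per-token set-check plus two chained dict lookups; correct because protected words are absent from the table and no plural output is a participle key.
import Mathlib
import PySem

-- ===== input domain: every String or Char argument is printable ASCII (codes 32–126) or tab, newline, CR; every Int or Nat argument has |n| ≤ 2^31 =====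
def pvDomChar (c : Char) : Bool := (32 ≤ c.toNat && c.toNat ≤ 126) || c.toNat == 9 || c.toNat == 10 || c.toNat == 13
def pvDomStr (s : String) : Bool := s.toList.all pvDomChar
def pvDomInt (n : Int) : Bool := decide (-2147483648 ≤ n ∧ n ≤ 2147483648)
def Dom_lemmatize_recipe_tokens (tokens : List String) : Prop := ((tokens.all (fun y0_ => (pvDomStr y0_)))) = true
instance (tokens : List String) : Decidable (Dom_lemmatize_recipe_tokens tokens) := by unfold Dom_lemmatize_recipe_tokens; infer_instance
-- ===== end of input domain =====

set_option maxRecDepth 4000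


-- B replaces A's per-token set-check plus two chained dict lookups by a single merged
-- table parsed once from one flat data string; one lookup per token (alternative structure).

-- ===== PORT A =====
def pluralMap : PySem.Dict String String := PySem.Dict.mk
  [("cloves", "clove"), ("leaves", "leaf"), ("sprigs", "sprig"), ("pods", "pod"),
   ("eggs", "egg"), ("tomatoes", "tomato"), ("shallots", "shallot"),
   ("cherries", "cherry"), ("berries", "berry")]

def protectS : PySem.Set String := PySem.Set.ofList ["couscous", "hummus", "asparagus"]

def participleMap : PySem.Dict String String := PySem.Dict.mk
  [("diced", "dice"), ("chopped", "chop"), ("minced", "mince"), ("grated", "grate"),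
   ("sliced", "slice"), ("crushed", "crush"), ("peeled", "peel"), ("zested", "zest"),
   ("juiced", "juice"), ("roasted", "roast"), ("toasted", "toast"), ("bruised", "bruise"),
   ("halved", "halve"), ("mashed", "mash"), ("rinsed", "rinse"), ("washed", "wash"),
   ("thinly", "thinly"), ("roughly", "roughly"), ("shredded", "shred")]

def lemmatize_recipe_tokens (tokens : List String) : List String :=
  tokens.foldl (fun out w =>
    let ww := w
    if PySem.Set.contains protectS ww then out ++ [ww]
    else
      let ww := if pluralMap.contains ww then pluralMap.getD ww ww else ww
      let ww := if participleMap.contains ww then participleMap.getD ww ww else ww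
      out ++ [ww]) []

-- ===== PORT B =====
def lemmaData : String :=
  "\ncloves clove  leaves leaf  sprigs sprig  pods pod  eggs egg\ntomatoes tomato  shallots shallot  cherries cherry  berries berry\ndiced dice  chopped chop  minced mince  grated grate  sliced slice\ncrushed crush  peeled peel  zested zest  juiced juice  roasted roast\ntoasted toast  bruised bruise  halved halve  mashed mash  rinsed rinse\nwashed wash  thinly thinly  roughly roughly  shredded shred\n"

-- dict(zip(it, it)) on one iterator pairs consecutive tokens
def pairUp : List String → List (String × String)
  | a :: b :: rest => (a, b) :: pairUp rest
  | _ => []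

def lemmaTable : PySem.Dict String String :=
  PySem.Dict.mk (pairUp (PySem.Str.split₀ lemmaData))

def lemmatize_recipe_tokens_alt (tokens : List String) : List String :=
  tokens.map (fun w => lemmaTable.getD w w)

-- ===== PRECONDITION & SPEC =====
def Spec_lemmatize_recipe_tokens (tokens : List String) (out : List String) : Prop := out = lemmatize_recipe_tokens_alt tokens
instance (tokens : List String) (out : List String) : Decidable (Spec_lemmatize_recipe_tokens tokens out) := by unfold Spec_lemmatize_recipe_tokens; infer_instance

-- ===== CLAIM (what is proved, stated in full; the proofs are below) =====
def Claim_equal_lemmatize_recipe_tokens : Prop := ∀ (tokens : List String), Dom_lemmatize_recipe_tokens tokens → Spec_lemmatize_recipe_tokens tokens (lemmatize_recipe_tokens tokens)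

-- ===== LEMMAS AND PROOFS =====

-- B's parsed pair list, evaluated once: the plural pairs followed by the participle pairs
theorem pairUp_split_eval :
    pairUp (PySem.Str.split₀ lemmaData) =
      [("cloves", "clove"), ("leaves", "leaf"), ("sprigs", "sprig"), ("pods", "pod"),
       ("eggs", "egg"), ("tomatoes", "tomato"), ("shallots", "shallot"),
       ("cherries", "cherry"), ("berries", "berry"),
       ("diced", "dice"), ("chopped", "chop"), ("minced", "mince"), ("grated", "grate"),
       ("sliced", "slice"), ("crushed", "crush"), ("peeled", "peel"), ("zested", "zest"),
       ("juiced", "juice"), ("roasted", "roast"), ("toasted", "toast"), ("bruised", "bruise"),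
       ("halved", "halve"), ("mashed", "mash"), ("rinsed", "rinse"), ("washed", "wash"),
       ("thinly", "thinly"), ("roughly", "roughly"), ("shredded", "shred")] := by
  decide

-- lookup in a concatenated literal dict is the first lookup, falling back to the second
theorem get?_mk_append (l1 l2 : List (String × String)) (w : String) :
    (PySem.Dict.mk (l1 ++ l2)).get? w
      = ((PySem.Dict.mk l1).get? w).orElse (fun _ => (PySem.Dict.mk l2).get? w) := by
  induction l1 with
  | nil => simp [PySem.Dict.get?]
  | cons p rest ih =>
    cases p with
    | mk k v =>
      rw [List.cons_append, PySem.Dict.get?_mk_cons, PySem.Dict.get?_mk_cons, ih]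
      by_cases h : k == w <;> simp [h]

-- "if w in d: w = d[w]" as a single optional lookup
theorem lookup_step (d : PySem.Dict String String) (x : String) :
    (if d.contains x then d.getD x x else x) = ((d.get? x).getD x) := by
  rw [PySem.Dict.getD_eq_get?_getD, PySem.Dict.contains_eq_isSome_get?]
  cases d.get? x <;> simp

-- B's table splits into A's two tables
theorem lemmaTable_get? (w : String) :
    lemmaTable.get? w = ((pluralMap.get? w).orElse (fun _ => participleMap.get? w)) := by
  rw [lemmaTable, pairUp_split_eval]
  exact get?_mk_append
    [("cloves", "clove"), ("leaves", "leaf"), ("sprigs", "sprig"), ("pods", "pod"),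
     ("eggs", "egg"), ("tomatoes", "tomato"), ("shallots", "shallot"),
     ("cherries", "cherry"), ("berries", "berry")]
    [("diced", "dice"), ("chopped", "chop"), ("minced", "mince"), ("grated", "grate"),
     ("sliced", "slice"), ("crushed", "crush"), ("peeled", "peel"), ("zested", "zest"),
     ("juiced", "juice"), ("roasted", "roast"), ("toasted", "toast"), ("bruised", "bruise"),
     ("halved", "halve"), ("mashed", "mash"), ("rinsed", "rinse"), ("washed", "wash"),
     ("thinly", "thinly"), ("roughly", "roughly"), ("shredded", "shred")] w

-- protected words are in neither table
theorem protect_not_in_table (w : String) (h : PySem.Set.contains protectS w = true) :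
    lemmaTable.get? w = none := by
  have hm : w ∈ (["couscous", "hummus", "asparagus"] : List String) := by
    simpa [protectS, PySem.Set.ofList] using h
  simp only [List.mem_cons, List.not_mem_nil, or_false] at hm
  rcases hm with rfl | rfl | rfl <;> decide

-- no plural output is a participle key
theorem plural_value_not_participle (w v : String) (h : pluralMap.get? w = some v) :
    participleMap.get? v = none := by
  have hi := PySem.Dict.mem_items_of_get?_eq_some (d := pluralMap) h
  have hv : v ∈ (["clove", "leaf", "sprig", "pod", "egg", "tomato", "shallot",
      "cherry", "berry"] : List String) := by
    have := List.mem_map_of_mem (f := fun p : String × String => p.2) hi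
    simpa [pluralMap] using this
  simp only [List.mem_cons, List.not_mem_nil, or_false] at hv
  rcases hv with rfl | rfl | rfl | rfl | rfl | rfl | rfl | rfl | rfl <;> decide

-- per-token agreement: A's branch logic equals one lookup in B's parsed table
theorem step_eq (w : String) :
    (if PySem.Set.contains protectS w then w
     else
       let ww := if pluralMap.contains w then pluralMap.getD w w else w
       if participleMap.contains ww then participleMap.getD ww ww else ww)
    = lemmaTable.getD w w := by
  rw [PySem.Dict.getD_eq_get?_getD (d := lemmaTable)]
  by_cases hp : PySem.Set.contains protectS w = true
  · rw [if_pos hp, protect_not_in_table w hp]; rfl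
  · rw [if_neg hp]
    simp only [lookup_step]
    rw [lemmaTable_get? w]
    cases hpl : pluralMap.get? w with
    | none => simp
    | some v => simp [plural_value_not_participle w v hpl]

-- ===== VERDICT =====
theorem lemmatize_recipe_tokens_spec : Claim_equal_lemmatize_recipe_tokens := by
  intro tokens _
  unfold Spec_lemmatize_recipe_tokens lemmatize_recipe_tokens lemmatize_recipe_tokens_alt
  have h : (fun (out : List String) (w : String) =>
        let ww := w
        if PySem.Set.contains protectS ww then out ++ [ww]
        else
          let ww := if pluralMap.contains ww then pluralMap.getD ww ww else ww
          let ww := if participleMap.contains ww then participleMap.getD ww ww else ww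
          out ++ [ww])
      = (fun out w => out ++ [lemmaTable.getD w w]) := by
    funext out w
    simp only [← step_eq w]
    split_ifs <;> rfl
  rw [h]
  simpa using PySem.List.foldl_append_singleton_eq_map (fun w => lemmaTable.getD w w) tokens []
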